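-- pv_equiv track=rewrite | github.com/gjoireh/cote-practice | 프로그래머스/LV0/코딩테스트 입문/등수 매기기/등수 매기기.py | solution
-- ===== SOURCE A (Python) =====
-- def solution(score):
--     answer = []
--
--     score = [sum(s) for s in score]
--     sorted_score = sorted(score, reverse=True)
--
--     dict1 = dict()
--     for i,ss in enumerate(sorted_score):
--         if ss not in dict1:
--             dict1[ss] = i + 1
--
--     answer = [dict1[s] for s in score]
--     return answer
-- ===== SOURCE B (Python) =====
-- def solution(score):
--     totals = [sum(s) for s in score]
--     return [1 + sum(1 for t in totals if t > s) for s in totals]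
-- ===== Notes on version B (the rewrite author's own statement) =====
-- stated objective: simpler
-- what changed: Replaces sort + first-occurrence rank dict with a direct count: each rank is 1 + the number of totals strictly greater, so no sorting and no dict is built.
import Mathlib
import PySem

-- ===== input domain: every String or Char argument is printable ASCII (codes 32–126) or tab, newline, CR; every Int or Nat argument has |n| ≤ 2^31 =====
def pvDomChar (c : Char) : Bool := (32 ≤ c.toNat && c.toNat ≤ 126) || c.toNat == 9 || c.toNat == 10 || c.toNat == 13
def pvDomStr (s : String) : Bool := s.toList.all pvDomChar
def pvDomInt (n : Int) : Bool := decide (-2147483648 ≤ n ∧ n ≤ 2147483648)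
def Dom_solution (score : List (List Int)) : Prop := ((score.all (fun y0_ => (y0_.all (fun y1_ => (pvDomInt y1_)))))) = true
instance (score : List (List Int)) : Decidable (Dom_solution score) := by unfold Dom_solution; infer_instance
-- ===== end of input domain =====

-- B replaces the sort + first-occurrence rank dict with a direct strictly-greater count (simpler, no sort/dict).

-- ===== PORT A =====
-- dict1[s]: the key s is always present (s ∈ totals, dict built over the sorted totals), so getD 0 is exact.
def solution (score : List (List Int)) : List Int :=
  let totals := score.map (fun s => s.sum)
  let sortedScore := PySem.List.sorted totals (fun x => x) true
  let dict1 := (PySem.List.enumerate sortedScore 0).foldl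
    (fun d p => if (PySem.Dict.get? d p.2).isNone then PySem.Dict.insert d p.2 (p.1 + 1) else d)
    (PySem.Dict.empty)
  totals.map (fun s => (PySem.Dict.get? dict1 s).getD 0)

-- ===== PORT B =====
def solution_alt (score : List (List Int)) : List Int :=
  let totals := score.map (fun s => s.sum)
  totals.map (fun s => 1 + (totals.countP (fun t => decide (s < t)) : Int))

-- ===== PRECONDITION & SPEC =====
def Spec_solution (score : List (List Int)) (out : List Int) : Prop := out = solution_alt score
instance (score : List (List Int)) (out : List Int) : Decidable (Spec_solution score out) := by unfold Spec_solution; infer_instance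

-- ===== CLAIM (what is proved, stated in full; the proofs are below) =====
def Claim_equal_solution : Prop := ∀ (score : List (List Int)), Dom_solution score → Spec_solution score (solution score)

-- ===== LEMMAS AND PROOFS =====

-- once a key is present, the dict-building loop never changes its value
theorem rankLoop_preserves (L : List (Int × Int)) (d : PySem.Dict Int Int) (t v : Int)
    (h : PySem.Dict.get? d t = some v) :
    PySem.Dict.get? (L.foldl
      (fun d p => if (PySem.Dict.get? d p.2).isNone then PySem.Dict.insert d p.2 (p.1 + 1) else d) d) t
      = some v := by
  induction L generalizing d with
  | nil => exact h
  | cons p rest ih =>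
    simp only [List.foldl_cons]
    split_ifs with hnone
    · apply ih
      have hne : p.2 ≠ t := by
        intro he; rw [he, h] at hnone; simp at hnone
      rw [PySem.Dict.get?_insert_of_ne _ _ (by simpa using fun he => hne he.symm)]
      exact h
    · exact ih _ h

-- the rank dict over a descending list maps each member t to (start index of the list) + #{strictly greater} + 1
theorem rankLoop_lookup (L : List Int) (n : Int) (d : PySem.Dict Int Int) (t : Int)
    (hdesc : L.Pairwise (fun a b => b ≤ a)) (ht : t ∈ L)
    (hnew : PySem.Dict.get? d t = none) :
    PySem.Dict.get? ((PySem.List.enumerate L n).foldl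
      (fun d p => if (PySem.Dict.get? d p.2).isNone then PySem.Dict.insert d p.2 (p.1 + 1) else d) d) t
      = some (n + (L.countP (fun x => decide (t < x)) : Int) + 1) := by
  induction L generalizing n d with
  | nil => cases ht
  | cons x rest ih =>
    rw [PySem.List.enumerate_cons]
    simp only [List.foldl_cons]
    rcases List.pairwise_cons.mp hdesc with ⟨hle, hrest⟩
    by_cases hx : x = t
    · subst hx
      rw [hnew]
      simp only [Option.isNone_none, if_true]
      have hcount : rest.countP (fun y => decide (x < y)) = 0 := by
        rw [List.countP_eq_zero]
        intro y hy
        simpa using not_lt.mpr (hle y hy)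
      rw [rankLoop_preserves _ _ _ _ (PySem.Dict.get?_insert_self _ _ _)]
      simp [hcount]
    · have htr : t ∈ rest := by
        cases List.mem_cons.mp ht with
        | inl h1 => exact absurd h1.symm hx
        | inr h2 => exact h2
      have htlt : t < x := lt_of_le_of_ne (hle t htr) (fun he => hx he.symm)
      have step : ∀ d' : PySem.Dict Int Int, PySem.Dict.get? d' t = none →
          PySem.Dict.get? ((PySem.List.enumerate rest (n + 1)).foldl
            (fun d p => if (PySem.Dict.get? d p.2).isNone then PySem.Dict.insert d p.2 (p.1 + 1) else d) d') t
            = some (n + ((x :: rest).countP (fun y => decide (t < y)) : Int) + 1) := by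
        intro d' hd'
        rw [ih (n + 1) d' hrest htr hd']
        have : (x :: rest).countP (fun y => decide (t < y))
            = rest.countP (fun y => decide (t < y)) + 1 := by
          simp [htlt]
        rw [this]
        push_cast
        ring_nf
      split_ifs with hnone
      · exact step _ (by
          rw [PySem.Dict.get?_insert_of_ne _ _ (by simpa using fun he => hx he.symm)]
          exact hnew)
      · exact step _ hnew

theorem countP_sorted_rev (totals : List Int) (t : Int) :
    (PySem.List.sorted totals (fun x => x) true).countP (fun y => decide (t < y))
      = totals.countP (fun y => decide (t < y)) :=
  (PySem.List.sorted_perm totals (fun x => x) true).countP_eq _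

-- ===== VERDICT (by name: the statement is the Claim_ definition above) =====
theorem solution_spec : Claim_equal_solution := by
  intro score _
  unfold Spec_solution solution solution_alt
  simp only []
  apply List.map_congr_left
  intro t ht
  have htmem : t ∈ PySem.List.sorted (score.map (fun s => s.sum)) (fun x => x) true := by
    rw [PySem.List.mem_sorted]; exact ht
  have hdesc : (PySem.List.sorted (score.map (fun s => s.sum)) (fun x => x) true).Pairwise
      (fun a b => b ≤ a) := PySem.List.sorted_pairwise_rev _ _
  rw [rankLoop_lookup _ 0 _ t hdesc htmem (PySem.Dict.get?_empty t)]
  rw [countP_sorted_rev]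
  simp [add_comm]
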